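-- pv_equiv track=rewrite | github.com/juliefolkerts/pp1 | 15-FinalGrades/p1.py | f
-- ===== SOURCE A (Python) =====
-- def f(n):
--     answer = -1
--     lst = list(str(n))
--     odds = []
--     for nr in lst:
--         if int(nr)%2 !=0:
--             odds.append(int(nr))
--     if odds:
--         answer = max(odds)-min(odds)
--     return answer
-- ===== SOURCE B (Python) =====
-- def f(n):
--     # Presence table over the fixed digit alphabet (counting-sort flavour):
--     # mark which digits occur, then scan the five odd digits from each end.
--     seen = [False] * 10
--     for ch in str(n):
--         seen[int(ch)] = True  # int(ch) per character, so '-'/'.' still raise ValueError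
--     hi = next((d for d in (9, 7, 5, 3, 1) if seen[d]), None)
--     if hi is None:
--         return -1
--     lo = next(d for d in (1, 3, 5, 7, 9) if seen[d])
--     return hi - lo
-- ===== Notes on version B (the rewrite author's own statement) =====
-- stated objective: alternative
-- what changed: Replaces collect-odd-digits-into-a-list-then-max-minus-min with a counting-sort-style boolean presence table over the fixed digit alphabet 0-9, answered by scanning the five odd digits from each end; no max/min/sort over collected data.
import Mathlib
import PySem

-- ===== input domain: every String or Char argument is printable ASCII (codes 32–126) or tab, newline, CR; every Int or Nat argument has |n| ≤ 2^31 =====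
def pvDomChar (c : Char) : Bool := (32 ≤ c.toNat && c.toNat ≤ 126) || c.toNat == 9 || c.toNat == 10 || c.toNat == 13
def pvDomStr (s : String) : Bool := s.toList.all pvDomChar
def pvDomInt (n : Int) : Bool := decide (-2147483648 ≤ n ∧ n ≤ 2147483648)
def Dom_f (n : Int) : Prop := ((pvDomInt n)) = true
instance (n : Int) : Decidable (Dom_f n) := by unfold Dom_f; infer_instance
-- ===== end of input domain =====

-- B replaces A's collect-odds-into-a-list-then-max-minus-min with a boolean presence
-- table over the fixed digit alphabet 0-9, answered by scanning the odd digits from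
-- each end (objective: alternative — counting-sort-style, no max/min over collected data).

-- ===== PORT A =====
-- int(nr) for a single character; .getD 0 is never reached inside Pre_f (digits only)
def pvDigitInt (c : Char) : Int := (PySem.Int.ofChars? [c]).getD 0

def f (n : Int) : Int :=
  let answer : Int := -1
  let lst := PySem.Int.toChars n
  let odds := lst.foldl (fun odds nr =>
      if PySem.Int.mod (pvDigitInt nr) 2 ≠ 0 then odds ++ [pvDigitInt nr] else odds) []
  if odds ≠ [] then
    (PySem.List.max? odds (fun x => x)).getD 0 - (PySem.List.min? odds (fun x => x)).getD 0
  else answer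

-- ===== PORT B =====
def f_alt (n : Int) : Int :=
  let seen := (PySem.Int.toChars n).foldl
      (fun s ch => PySem.List.pySetD s (pvDigitInt ch) true) (List.replicate 10 false)
  match ([9, 7, 5, 3, 1] : List Int).find? (fun d => PySem.List.pyGetD seen d false) with
  | none => -1
  | some hi =>
    match ([1, 3, 5, 7, 9] : List Int).find? (fun d => PySem.List.pyGetD seen d false) with
    | none => 0  -- unreachable (hi found ⇒ some odd entry is true); Python's bare next() would raise here
    | some lo => hi - lo

-- ===== PRECONDITION & SPEC =====
-- Pre_f excludes exactly the negative n, where str(n) starts with '-' and int('-') raises ValueError in both programs.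
def Pre_f (n : Int) : Prop := 0 ≤ n
instance (n : Int) : Decidable (Pre_f n) := by unfold Pre_f; infer_instance
def pvWitness_f : Int := 13579
def Spec_f (n : Int) (out : Int) : Prop := out = f_alt n
instance (n : Int) (out : Int) : Decidable (Spec_f n out) := by unfold Spec_f; infer_instance

-- ===== CLAIM (what is proved, stated in full; the proofs are below) =====
def Claim_equal_f : Prop := ∀ (n : Int), Dom_f n → Pre_f n → Spec_f n (f n)

-- ===== LEMMAS AND PROOFS =====

-- every character str emits for a nonnegative int is a decimal digit character
theorem pvToDigits_chars (b f₀ m : Nat) (acc : List Char)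
    (hacc : ∀ c ∈ acc, ∃ d : Nat, d < b ∧ c = Nat.digitChar d) (hb : 0 < b) :
    ∀ c ∈ Nat.toDigitsCore b f₀ m acc, ∃ d : Nat, d < b ∧ c = Nat.digitChar d := by
  induction f₀ generalizing m acc with
  | zero => simpa [Nat.toDigitsCore] using hacc
  | succ f ih =>
    intro c hc
    simp only [Nat.toDigitsCore] at hc
    by_cases h : m / b = 0
    · rw [if_pos h] at hc
      rcases List.mem_cons.mp hc with h' | h'
      · exact ⟨m % b, Nat.mod_lt _ hb, h'⟩
      · exact hacc _ h'
    · rw [if_neg h] at hc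
      refine ih (m / b) _ ?_ c hc
      intro c' hc'
      rcases List.mem_cons.mp hc' with h' | h'
      · exact ⟨m % b, Nat.mod_lt _ hb, h'⟩
      · exact hacc _ h'

theorem pvDigitInt_digitChar (d : Nat) (hd : d < 10) :
    pvDigitInt (Nat.digitChar d) = (d : Int) := by
  interval_cases d <;> decide

-- digits of a nonnegative n: the value of each character is in 0..9
theorem pvDigit_range {n : Int} (hn : 0 ≤ n) :
    ∀ c ∈ PySem.Int.toChars n, ∃ d : Nat, d < 10 ∧ pvDigitInt c = (d : Int) := by
  intro c hc
  have : PySem.Int.toChars n = Nat.toDigits 10 n.toNat := by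
    simp [PySem.Int.toChars, not_lt.mpr hn]
  rw [this] at hc
  obtain ⟨d, hd, rfl⟩ := pvToDigits_chars 10 _ _ [] (by simp) (by norm_num) c hc
  exact ⟨d, hd, pvDigitInt_digitChar d hd⟩

-- A's odds list is the filtered-mapped digit list
theorem pvOdds_eq (cs : List Char) :
    cs.foldl (fun odds nr =>
        if PySem.Int.mod (pvDigitInt nr) 2 ≠ 0 then odds ++ [pvDigitInt nr] else odds) []
      = ((cs.filter (fun nr => PySem.Int.mod (pvDigitInt nr) 2 ≠ 0)).map pvDigitInt) := by
  simpa using PySem.List.foldl_append_if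
    (fun nr => decide (PySem.Int.mod (pvDigitInt nr) 2 ≠ 0)) pvDigitInt cs []

-- B's presence table: length is preserved and the bit at i says "some char has digit i"
theorem pvSeen_length (cs : List Char) (s : List Bool) :
    (cs.foldl (fun s ch => PySem.List.pySetD s (pvDigitInt ch) true) s).length = s.length := by
  induction cs generalizing s with
  | nil => rfl
  | cons c cs ih => simp [List.foldl_cons, ih, PySem.List.length_pySetD]

theorem pvSetD_getD (s : List Bool) (d : Int) (i : Nat) (hi : i < s.length) (h0 : 0 ≤ d) :
    (PySem.List.pySetD s d true).getD i false = (s.getD i false || d == (i : Int)) := by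
  rw [PySem.List.pySetD_of_nonneg _ _ h0]
  by_cases hc : d = (i : Int)
  · have hti : d.toNat = i := by omega
    simp only [List.getD_eq_getElem?_getD, hti, List.getElem?_set_self']
    rw [List.getElem?_eq_getElem hi]
    simp [hc]
  · have hne : d.toNat ≠ i := by omega
    simp only [List.getD_eq_getElem?_getD]
    simp [List.getElem?_set_ne hne, hc]

theorem pvSeen_getD (cs : List Char) (s : List Bool) (i : Nat) (hi : i < s.length)
    (hnn : ∀ c ∈ cs, 0 ≤ pvDigitInt c) :
    (cs.foldl (fun s ch => PySem.List.pySetD s (pvDigitInt ch) true) s).getD i false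
      = (s.getD i false || cs.any (fun ch => pvDigitInt ch == (i : Int))) := by
  induction cs generalizing s with
  | nil => simp
  | cons c cs ih =>
    simp only [List.foldl_cons, List.any_cons]
    rw [ih _ (by simp [PySem.List.length_pySetD, hi]) (fun c' hc' => hnn c' (List.mem_cons_of_mem _ hc')),
      pvSetD_getD s _ i hi (hnn c List.mem_cons_self)]
    rw [Bool.or_assoc]

-- first hit of a strictly descending scan is the maximum satisfying element
theorem pvFind_desc (L : List Int) (Q : Int → Bool) (m : Int)
    (hL : L.Pairwise (· > ·)) (hmem : m ∈ L) (hm : Q m = true)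
    (hub : ∀ x ∈ L, Q x = true → x ≤ m) : L.find? Q = some m := by
  induction L with
  | nil => cases hmem
  | cons a t ih =>
    rcases List.mem_cons.mp hmem with rfl | hmt
    · simp [List.find?, hm]
    · have hgt : a > m := (List.pairwise_cons.mp hL).1 m hmt
      have ha : Q a = false := by
        cases hQ : Q a
        · rfl
        · exact absurd (hub a List.mem_cons_self hQ) (by omega)
      simp only [List.find?, ha]
      exact ih (List.pairwise_cons.mp hL).2 hmt (fun x hx => hub x (List.mem_cons_of_mem _ hx))

-- first hit of a strictly ascending scan is the minimum satisfying element
theorem pvFind_asc (L : List Int) (Q : Int → Bool) (m : Int)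
    (hL : L.Pairwise (· < ·)) (hmem : m ∈ L) (hm : Q m = true)
    (hlb : ∀ x ∈ L, Q x = true → m ≤ x) : L.find? Q = some m := by
  induction L with
  | nil => cases hmem
  | cons a t ih =>
    rcases List.mem_cons.mp hmem with rfl | hmt
    · simp [List.find?, hm]
    · have hlt : a < m := (List.pairwise_cons.mp hL).1 m hmt
      have ha : Q a = false := by
        cases hQ : Q a
        · rfl
        · exact absurd (hlb a List.mem_cons_self hQ) (by omega)
      simp only [List.find?, ha]
      exact ih (List.pairwise_cons.mp hL).2 hmt (fun x hx => hlb x (List.mem_cons_of_mem _ hx))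

-- ===== VERDICT (by name: the statement is the Claim_ definition above) =====
theorem f_spec : Claim_equal_f := by
  intro n _ hn
  unfold Spec_f f f_alt
  dsimp only
  set cs := PySem.Int.toChars n with hcs
  have hrange := pvDigit_range hn
  rw [pvOdds_eq]
  set odds := (cs.filter (fun nr => PySem.Int.mod (pvDigitInt nr) 2 ≠ 0)).map pvDigitInt
    with hodds
  set seen := cs.foldl (fun s ch => PySem.List.pySetD s (pvDigitInt ch) true)
      (List.replicate 10 false) with hseen
  have hslen : seen.length = 10 := by rw [hseen, pvSeen_length]; simp
  -- the presence bit at an odd digit position i says i ∈ odds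
  have hbit : ∀ i : Nat, i < 10 → PySem.Int.mod (i : Int) 2 ≠ 0 →
      (PySem.List.pyGetD seen (i : Int) false = true ↔ (i : Int) ∈ odds) := by
    intro i hi hoddi
    rw [PySem.List.pyGetD_natCast, hseen, pvSeen_getD _ _ _ (by simp; omega)
      (fun c hc => by obtain ⟨d, _, hd⟩ := hrange c hc; rw [hd]; exact Int.natCast_nonneg d)]
    rw [List.getD_eq_getElem _ _ (by simpa using hi), List.getElem_replicate]
    simp only [Bool.false_or, List.any_eq_true, beq_iff_eq]
    constructor
    · rintro ⟨ch, hch, hv⟩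
      rw [hodds]
      refine List.mem_map.mpr ⟨ch, List.mem_filter.mpr ⟨hch, ?_⟩, hv⟩
      simpa [hv] using hoddi
    · intro hmem
      rw [hodds] at hmem
      obtain ⟨ch, hch, hv⟩ := List.mem_map.mp hmem
      exact ⟨ch, List.mem_filter.mp hch |>.1, hv⟩
  -- every element of odds is an odd digit value 0..9
  have hoddsmem : ∀ x ∈ odds, PySem.Int.mod x 2 ≠ 0 ∧ ∃ d : Nat, d < 10 ∧ x = (d : Int) := by
    intro x hx
    rw [hodds] at hx
    obtain ⟨ch, hch, hv⟩ := List.mem_map.mp hx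
    obtain ⟨hch', hp⟩ := List.mem_filter.mp hch
    obtain ⟨d, hd, hdv⟩ := hrange ch hch'
    exact ⟨by simpa [hv] using hp, d, hd, by rw [← hv, hdv]⟩
  cases hoe : odds with
  | nil =>
    -- no odd digit: every scanned bit is false, both return -1
    have hnone : (([9,7,5,3,1] : List Int).find?
        (fun d => PySem.List.pyGetD seen d false)) = none := by
      rw [List.find?_eq_none]
      intro x hx hq
      have hfalse : ∀ i : Nat, i < 10 → PySem.Int.mod (i : Int) 2 ≠ 0 → x = (i : Int) → False := by
        intro i hi hio hxi
        subst hxi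
        have := (hbit i hi hio).mp hq
        simp [hoe] at this
      fin_cases hx
      · exact hfalse 9 (by norm_num) (by decide) (by norm_num)
      · exact hfalse 7 (by norm_num) (by decide) (by norm_num)
      · exact hfalse 5 (by norm_num) (by decide) (by norm_num)
      · exact hfalse 3 (by norm_num) (by decide) (by norm_num)
      · exact hfalse 1 (by norm_num) (by decide) (by norm_num)
    simp [hnone]
  | cons x t =>
    have hne : odds ≠ [] := by simp [hoe]
    -- A's max and min
    obtain ⟨mx, hmx⟩ : ∃ m, PySem.List.max? odds (fun x => x) = some m := by
      cases h : PySem.List.max? odds (fun x => x) with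
      | none => exact absurd ((PySem.List.max?_eq_none_iff _ _).mp h) hne
      | some m => exact ⟨m, rfl⟩
    obtain ⟨mn, hmn⟩ : ∃ m, PySem.List.min? odds (fun x => x) = some m := by
      cases h : PySem.List.min? odds (fun x => x) with
      | none => exact absurd ((PySem.List.min?_eq_none_iff _ _).mp h) hne
      | some m => exact ⟨m, rfl⟩
    have hmxmem : mx ∈ odds := PySem.List.max?_mem hmx
    have hmnmem : mn ∈ odds := PySem.List.min?_mem hmn
    have hmxub : ∀ y ∈ odds, y ≤ mx := PySem.List.max?_isMax hmx
    have hmnlb : ∀ y ∈ odds, mn ≤ y := PySem.List.min?_isMin hmn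
    obtain ⟨hmxodd, dx, hdx, hdxe⟩ := hoddsmem mx hmxmem
    obtain ⟨hmnodd, dn, hdn, hdne⟩ := hoddsmem mn hmnmem
    -- the descending scan finds mx
    have hfindhi : (([9,7,5,3,1] : List Int).find?
        (fun d => PySem.List.pyGetD seen d false)) = some mx := by
      apply pvFind_desc _ _ mx (by decide)
      · subst hdxe
        have : dx = 1 ∨ dx = 3 ∨ dx = 5 ∨ dx = 7 ∨ dx = 9 := by
          interval_cases dx <;> first | (exfalso; exact hmxodd (by decide)) | tauto
        rcases this with rfl | rfl | rfl | rfl | rfl <;> decide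
      · subst hdxe; exact (hbit dx hdx hmxodd).mpr hmxmem
      · intro y hy hq
        have hybit : ∀ i : Nat, i < 10 → PySem.Int.mod (i:Int) 2 ≠ 0 → y = (i:Int) → y ≤ mx := by
          intro i hi hio hyi
          subst hyi
          exact hmxub _ ((hbit i hi hio).mp hq)
        fin_cases hy
        · exact hybit 9 (by norm_num) (by decide) (by norm_num)
        · exact hybit 7 (by norm_num) (by decide) (by norm_num)
        · exact hybit 5 (by norm_num) (by decide) (by norm_num)
        · exact hybit 3 (by norm_num) (by decide) (by norm_num)
        · exact hybit 1 (by norm_num) (by decide) (by norm_num)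
    have hfindlo : (([1,3,5,7,9] : List Int).find?
        (fun d => PySem.List.pyGetD seen d false)) = some mn := by
      apply pvFind_asc _ _ mn (by decide)
      · subst hdne
        have : dn = 1 ∨ dn = 3 ∨ dn = 5 ∨ dn = 7 ∨ dn = 9 := by
          interval_cases dn <;> first | (exfalso; exact hmnodd (by decide)) | tauto
        rcases this with rfl | rfl | rfl | rfl | rfl <;> decide
      · subst hdne; exact (hbit dn hdn hmnodd).mpr hmnmem
      · intro y hy hq
        have hybit : ∀ i : Nat, i < 10 → PySem.Int.mod (i:Int) 2 ≠ 0 → y = (i:Int) → mn ≤ y := by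
          intro i hi hio hyi
          subst hyi
          exact hmnlb _ ((hbit i hi hio).mp hq)
        fin_cases hy
        · exact hybit 1 (by norm_num) (by decide) (by norm_num)
        · exact hybit 3 (by norm_num) (by decide) (by norm_num)
        · exact hybit 5 (by norm_num) (by decide) (by norm_num)
        · exact hybit 7 (by norm_num) (by decide) (by norm_num)
        · exact hybit 9 (by norm_num) (by decide) (by norm_num)
    rw [← hoe]
    simp [hne, hmx, hmn, hfindhi, hfindlo]
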